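-- pv_equiv track=rewrite | github.com/dropbox/pyxl | pyxl/codec/tokenizer.py | get_end_pos
-- ===== SOURCE A (Python) =====
-- from collections import namedtuple
--
-- Pos = namedtuple('Pos', ['row', 'col'])
--
-- def get_end_pos(start_pos, tvalue):
--     row, col = start_pos
--     for c in tvalue:
--         if c == '\n':
--             col = 0
--             row += 1
--         else:
--             col += 1
--     return Pos(row, col)
-- ===== SOURCE B (Python) =====
-- from collections import namedtuple
--
-- Pos = namedtuple('Pos', ['row', 'col'])
--
-- def get_end_pos(start_pos, tvalue):
--     rows = 0
--     tail = 0                 # characters after the last newline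
--     seen_newline = False
--     for c in reversed(tvalue):
--         if c == '\n':
--             rows += 1
--             seen_newline = True
--         elif not seen_newline:
--             tail += 1
--     row, col = start_pos
--     return Pos(row + rows, tail if seen_newline else col + tail)
-- ===== Notes on version B (the rewrite author's own statement) =====
-- stated objective: alternative
-- what changed: B scans the string back-to-front once, counting every newline and measuring only the tail after the last newline, instead of A's forward state machine that resets the column at each newline; the start column is folded in only at the end.
import Mathlib
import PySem

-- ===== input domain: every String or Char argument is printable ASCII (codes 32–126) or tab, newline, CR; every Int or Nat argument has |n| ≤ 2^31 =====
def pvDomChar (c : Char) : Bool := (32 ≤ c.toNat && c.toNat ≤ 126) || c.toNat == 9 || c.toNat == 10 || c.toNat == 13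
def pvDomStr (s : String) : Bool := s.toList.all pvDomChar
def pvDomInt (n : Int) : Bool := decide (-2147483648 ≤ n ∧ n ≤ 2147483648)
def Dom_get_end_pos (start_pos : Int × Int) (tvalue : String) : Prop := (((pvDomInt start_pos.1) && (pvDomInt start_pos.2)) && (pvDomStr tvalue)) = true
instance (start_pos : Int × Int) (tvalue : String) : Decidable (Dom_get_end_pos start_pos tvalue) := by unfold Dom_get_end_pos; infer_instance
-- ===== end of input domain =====

-- B: one back-to-front pass counting newlines and the tail after the last one (alternative traversal; return-value equivalence)
-- ===== PORT A =====
def get_end_pos (start_pos : Int × Int) (tvalue : String) : Int × Int :=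
  tvalue.toList.foldl
    (fun (st : Int × Int) c =>
      if c = '\n' then (st.1 + 1, 0) else (st.1, st.2 + 1))
    start_pos

-- ===== PORT B =====
def get_end_pos_alt (start_pos : Int × Int) (tvalue : String) : Int × Int :=
  let st := tvalue.toList.reverse.foldl
    (fun (st : Int × Int × Bool) c =>
      if c = '\n' then (st.1 + 1, st.2.1, true)
      else if st.2.2 = false then (st.1, st.2.1 + 1, st.2.2)
      else st)
    (0, 0, false)
  (start_pos.1 + st.1, if st.2.2 then st.2.1 else start_pos.2 + st.2.1)

-- ===== PRECONDITION & SPEC =====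
def Spec_get_end_pos (start_pos : Int × Int) (tvalue : String) (out : Int × Int) : Prop := out = get_end_pos_alt start_pos tvalue
instance (start_pos : Int × Int) (tvalue : String) (out : Int × Int) : Decidable (Spec_get_end_pos start_pos tvalue out) := by unfold Spec_get_end_pos; infer_instance

-- ===== CLAIM (what is proved, stated in full; the proofs are below) =====
def Claim_equal_get_end_pos : Prop := ∀ (start_pos : Int × Int) (tvalue : String), Dom_get_end_pos start_pos tvalue → Spec_get_end_pos start_pos tvalue (get_end_pos start_pos tvalue)

-- ===== LEMMAS AND PROOFS =====

-- ===== VERDICT (by name: the statement is the Claim_ definition above) =====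
theorem foldl_end_pos (l : List Char) (r c : Int) :
    l.foldl (fun (st : Int × Int) c => if c = '\n' then (st.1 + 1, 0) else (st.1, st.2 + 1)) (r, c)
      = ((r + (l.reverse.foldl
            (fun (st : Int × Int × Bool) c =>
              if c = '\n' then (st.1 + 1, st.2.1, true)
              else if st.2.2 = false then (st.1, st.2.1 + 1, st.2.2)
              else st) (0, 0, false)).1),
         (if (l.reverse.foldl
            (fun (st : Int × Int × Bool) c =>
              if c = '\n' then (st.1 + 1, st.2.1, true)
              else if st.2.2 = false then (st.1, st.2.1 + 1, st.2.2)
              else st) (0, 0, false)).2.2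
          then (l.reverse.foldl
            (fun (st : Int × Int × Bool) c =>
              if c = '\n' then (st.1 + 1, st.2.1, true)
              else if st.2.2 = false then (st.1, st.2.1 + 1, st.2.2)
              else st) (0, 0, false)).2.1
          else c + (l.reverse.foldl
            (fun (st : Int × Int × Bool) c =>
              if c = '\n' then (st.1 + 1, st.2.1, true)
              else if st.2.2 = false then (st.1, st.2.1 + 1, st.2.2)
              else st) (0, 0, false)).2.1)) := by
  induction l generalizing r c with
  | nil => simp
  | cons x t ih =>
    simp only [List.foldl_cons, List.reverse_cons, List.foldl_append, List.foldl_nil]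
    rcases hG : t.reverse.foldl
        (fun (st : Int × Int × Bool) c =>
          if c = '\n' then (st.1 + 1, st.2.1, true)
          else if st.2.2 = false then (st.1, st.2.1 + 1, st.2.2)
          else st) (0, 0, false) with ⟨rows, tail, seen⟩
    by_cases hx : x = '\n'
    · rw [if_pos hx, ih, hG]
      simp only [if_pos hx]
      cases seen <;> simp <;> ring
    · rw [if_neg hx, ih, hG]
      simp only [if_neg hx]
      cases seen <;> simp <;> ring

theorem get_end_pos_spec : Claim_equal_get_end_pos := by
  intro sp tv _
  obtain ⟨r, c⟩ := sp
  unfold Spec_get_end_pos get_end_pos get_end_pos_alt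
  rw [foldl_end_pos]
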